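-- pv_equiv track=rewrite | github.com/andrew071176/Lecture_1 | PY_START_Lecture_09_HM_10.py | f1_1
-- ===== SOURCE A (Python) =====
-- def f1_1(list_1: list) -> int:
--     difference = list_1[1] - list_1[0]
--     for i in range (1, len(list_1)):
--         if list_1[i] - list_1[i-1] == difference:
--             if i == len(list_1) - 1:
--                 return list_1[i] + difference
--         else:
--             return False
-- ===== SOURCE B (Python) =====
-- def f1_1(list_1: list) -> int:
--     difference = list_1[1] - list_1[0]
--     n = len(list_1)
--     expected = [list_1[0] + i * difference for i in range(n)]
--     if list_1 == expected:
--         return list_1[-1] + difference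
--     return False
-- ===== Notes on version B (the rewrite author's own statement) =====
-- stated objective: alternative
-- what changed: B builds the whole predicted arithmetic sequence from a closed form list_1[0]+i*d and compares it to the input in one equality test, instead of A's incremental pairwise-difference loop with early returns.
-- outside the precondition, e.g. on f1_1([1, 2, 4]): A returns False, B returns False; on f1_1([0]): A raises IndexError, B raises IndexError
import Mathlib
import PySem

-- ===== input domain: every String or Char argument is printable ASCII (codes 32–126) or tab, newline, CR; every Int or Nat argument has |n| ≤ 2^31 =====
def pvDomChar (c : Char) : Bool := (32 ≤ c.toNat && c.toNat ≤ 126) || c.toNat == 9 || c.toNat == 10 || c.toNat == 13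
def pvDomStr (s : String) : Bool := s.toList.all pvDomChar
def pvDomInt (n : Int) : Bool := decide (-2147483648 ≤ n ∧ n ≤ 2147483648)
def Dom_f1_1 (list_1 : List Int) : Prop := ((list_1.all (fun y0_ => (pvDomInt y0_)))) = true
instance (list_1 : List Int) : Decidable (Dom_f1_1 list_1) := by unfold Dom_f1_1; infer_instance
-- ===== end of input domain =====

-- B replaces A's incremental pairwise-difference loop by building the predicted
-- arithmetic sequence in closed form and comparing it to the input (alternative
-- decomposition, same cost); equivalence is about the return value only.

-- ===== PORT A =====
-- A's for-loop over range(1, len) with early returns; the two `0` results stand for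
-- Python's `return False` branch and the fall-off-the-end `None`, both outside Pre_.
def f1_1Loop (l : List Int) (difference : Int) (i : Nat) : Int :=
  if _h : i < l.length then
    if PySem.List.pyGetD l (i : Int) 0 - PySem.List.pyGetD l ((i : Int) - 1) 0 = difference then
      if (i : Int) = (l.length : Int) - 1 then
        PySem.List.pyGetD l (i : Int) 0 + difference
      else
        f1_1Loop l difference (i + 1)
    else 0      -- return False  (excluded by Pre_)
  else 0        -- implicit return None  (excluded by Pre_)
termination_by l.length - i

def f1_1 (list_1 : List Int) : Int :=
  let difference := PySem.List.pyGetD list_1 1 0 - PySem.List.pyGetD list_1 0 0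
  f1_1Loop list_1 difference 1

-- ===== PORT B =====
def f1_1_alt (list_1 : List Int) : Int :=
  let difference := PySem.List.pyGetD list_1 1 0 - PySem.List.pyGetD list_1 0 0
  let n := list_1.length
  let expected := (PySem.List.pyRange 0 (n : Int) 1).map
      (fun i => PySem.List.pyGetD list_1 0 0 + i * difference)
  if list_1 = expected then PySem.List.pyGetD list_1 (-1) 0 + difference
  else 0        -- return False  (excluded by Pre_)

-- ===== PRECONDITION & SPEC =====
-- Pre_ excludes lists of length < 2 (A raises IndexError on list_1[1]) and lists that
-- are not an arithmetic progression, on which A returns the bool False instead of an int.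
def Pre_f1_1 (list_1 : List Int) : Prop :=
  2 ≤ list_1.length ∧
    ∀ i < list_1.length - 1,
      list_1.getD (i + 1) 0 - list_1.getD i 0 = list_1.getD 1 0 - list_1.getD 0 0
instance (list_1 : List Int) : Decidable (Pre_f1_1 list_1) := by unfold Pre_f1_1; infer_instance
def pvWitness_f1_1 : List Int := ([3, 5, 7, 9])
def Spec_f1_1 (list_1 : List Int) (out : Int) : Prop := out = f1_1_alt list_1
instance (list_1 : List Int) (out : Int) : Decidable (Spec_f1_1 list_1 out) := by unfold Spec_f1_1; infer_instance

-- ===== CLAIM (what is proved, stated in full; the proofs are below) =====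
def Claim_equal_f1_1 : Prop := ∀ (list_1 : List Int), Dom_f1_1 list_1 → Pre_f1_1 list_1 → Spec_f1_1 list_1 (f1_1 list_1)

-- ===== LEMMAS AND PROOFS =====

-- In an arithmetic progression every element is the closed form first + i*d.
theorem ap_getD (l : List Int) (h : Pre_f1_1 l) :
    ∀ i < l.length, l.getD i 0 = l.getD 0 0 + (i : Int) * (l.getD 1 0 - l.getD 0 0) := by
  intro i hi
  induction i with
  | zero => simp
  | succ k ih =>
      have hk : k < l.length - 1 := by omega
      have := h.2 k hk
      have := ih (by omega)
      push_cast
      linarith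

-- A's loop, started anywhere inside the list, runs to the end under Pre_.
theorem f1_1Loop_eq (l : List Int) (h : Pre_f1_1 l) :
    ∀ i, 1 ≤ i → i < l.length →
      f1_1Loop l (l.getD 1 0 - l.getD 0 0) i = l.getD (l.length - 1) 0 + (l.getD 1 0 - l.getD 0 0) := by
  intro i h1 h2
  generalize hm : l.length - i = m
  induction m generalizing i with
  | zero => omega
  | succ m ih =>
    rw [f1_1Loop]
    have hstep : l.getD i 0 - l.getD (i - 1) 0 = l.getD 1 0 - l.getD 0 0 := by
      have := h.2 (i - 1) (by omega)
      have : i - 1 + 1 = i := by omega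
      simp_all
    have hg : ∀ (k : Nat), k < l.length →
        PySem.List.pyGetD l (k : Int) 0 = l.getD k 0 := by
      intro k hk; simp [PySem.List.pyGetD_natCast]
    have hgi : PySem.List.pyGetD l ((i : Int) - 1) 0 = l.getD (i - 1) 0 := by
      have : ((i : Int) - 1) = ((i - 1 : Nat) : Int) := by omega
      rw [this, PySem.List.pyGetD_natCast]
    rw [dif_pos h2, hg i h2, hgi, if_pos hstep]
    by_cases hlast : (i : Int) = (l.length : Int) - 1
    · have : i = l.length - 1 := by omega
      rw [if_pos hlast, this]
    · have hi' : i + 1 < l.length := by omega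
      rw [if_neg hlast]
      exact ih (i + 1) (by omega) hi' (by omega)

theorem f1_1_spec' (l : List Int) (h : Pre_f1_1 l) : f1_1 l = f1_1_alt l := by
  have hlen := h.1
  have hne : l ≠ [] := by intro hnil; simp [hnil] at hlen
  set d := l.getD 1 0 - l.getD 0 0 with hd
  -- the expected list equals l
  have hexp : l = (PySem.List.pyRange 0 (l.length : Int) 1).map
      (fun i => PySem.List.pyGetD l 0 0 + i * d) := by
    rw [PySem.List.pyRange_one]
    apply List.ext_getElem
    · simp
    · intro k hk hk'
      have hk2 : k < l.length := by simpa using hk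
      have := ap_getD l h k hk2
      have h0 : PySem.List.pyGetD l 0 0 = l.getD 0 0 := by
        simp [PySem.List.pyGetD_zero]
      simp only [List.getElem_map, List.getElem_range, h0]
      rw [← List.getD_eq_getElem l 0 hk2, this]
      ring
  -- A side
  have hA : f1_1 l = l.getD (l.length - 1) 0 + d := by
    unfold f1_1
    have h1 : PySem.List.pyGetD l 1 0 - PySem.List.pyGetD l 0 0 = d := by
      have e1 : PySem.List.pyGetD l 1 0 = l.getD 1 0 := by
        have : (1 : Int) = ((1 : Nat) : Int) := by norm_num
        rw [this, PySem.List.pyGetD_natCast]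
      have e0 : PySem.List.pyGetD l 0 0 = l.getD 0 0 := by
        simp [PySem.List.pyGetD_zero]
      rw [e1, e0]
    rw [h1]
    exact f1_1Loop_eq l h 1 le_rfl (by omega)
  -- B side
  have hB : f1_1_alt l = l.getD (l.length - 1) 0 + d := by
    unfold f1_1_alt
    have h1 : PySem.List.pyGetD l 1 0 - PySem.List.pyGetD l 0 0 = d := by
      have e1 : PySem.List.pyGetD l 1 0 = l.getD 1 0 := by
        have : (1 : Int) = ((1 : Nat) : Int) := by norm_num
        rw [this, PySem.List.pyGetD_natCast]
      have e0 : PySem.List.pyGetD l 0 0 = l.getD 0 0 := by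
        simp [PySem.List.pyGetD_zero]
      rw [e1, e0]
    simp only [h1]
    rw [if_pos (by rw [← hexp])]
    congr 1
    rw [PySem.List.pyGetD_neg_one l 0 hne, List.getLast_eq_getElem,
      List.getD_eq_getElem l 0 (by omega)]
  rw [hA, hB]

-- ===== VERDICT (by name: the statement is the Claim_ definition above) =====
theorem f1_1_spec : Claim_equal_f1_1 := by
  intro l _ hpre
  unfold Spec_f1_1
  exact f1_1_spec' l hpre
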